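-- pv_equiv track=rewrite | github.com/woo3145/ps-hub | 백준/Silver/31799. 평점 변환/평점 변환.py | split_score
-- ===== SOURCE A (Python) =====
-- def split_score(str):
--     arr = []
--     score = ''
--     for char in str:
--         if char in '+-':
--             arr.append(score + char)
--             score = ''
--         else:
--             if(score != ''):
--                 arr.append(score)
--             score = char
--     if(score != ''): arr.append(score)
--
--     return arr
-- ===== SOURCE B (Python) =====
-- def split_score(str):
--     arr = []
--     i = 0
--     n = len(str)
--     while i < n:
--         c = str[i]
--         if c in '+-':
--             arr.append(c)
--             i += 1
--         elif i + 1 < n and str[i + 1] in '+-':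
--             arr.append(c + str[i + 1])
--             i += 2
--         else:
--             arr.append(c)
--             i += 1
--     return arr
-- ===== Notes on version B (the rewrite author's own statement) =====
-- stated objective: simpler
-- what changed: Replaced A's stateful accumulator scan (carrying a pending 'score' buffer and a final flush) with a direct one-char-lookahead tokenizer that emits each token immediately and never holds state across iterations.
import Mathlib
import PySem

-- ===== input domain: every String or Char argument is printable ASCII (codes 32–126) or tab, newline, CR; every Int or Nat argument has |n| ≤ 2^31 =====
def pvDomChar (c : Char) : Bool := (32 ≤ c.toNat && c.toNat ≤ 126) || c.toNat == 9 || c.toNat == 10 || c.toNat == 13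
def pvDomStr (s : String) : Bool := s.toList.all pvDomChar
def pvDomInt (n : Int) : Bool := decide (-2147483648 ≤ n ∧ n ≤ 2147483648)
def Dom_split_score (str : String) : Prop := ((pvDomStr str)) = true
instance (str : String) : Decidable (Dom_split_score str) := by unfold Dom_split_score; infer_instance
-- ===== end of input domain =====

-- B replaces A's pending-buffer scan with a stateless one-char-lookahead tokenizer (simpler decomposition, same O(n) cost).

-- ===== PORT A =====
-- `char in '+-'` on a single char is membership in {'+','-'}; ported exactly as that test.
def pvSignA (c : Char) : Bool := c = '+' || c = '-'

-- one iteration of A's for-loop over the state (arr, score)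
def pvStepA (st : List String × String) (c : Char) : List String × String :=
  if pvSignA c then (st.1 ++ [st.2.push c], "")
  else if st.2 ≠ "" then (st.1 ++ [st.2], String.ofList [c])
  else (st.1, String.ofList [c])

def split_score (str : String) : List String :=
  let st := str.toList.foldl pvStepA ([], "")
  if st.2 ≠ "" then st.1 ++ [st.2] else st.1

-- ===== PORT B =====
def pvSignB (c : Char) : Bool := c = '+' || c = '-'

-- the while loop of Source B: position i is the head of the remaining char list
def pvGoB : List Char → List String
  | [] => []
  | c :: rest =>
    if pvSignB c then String.ofList [c] :: pvGoB rest
    else match rest with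
      | d :: rest' =>
        if pvSignB d then String.ofList [c, d] :: pvGoB rest'
        else String.ofList [c] :: pvGoB (d :: rest')
      | [] => [String.ofList [c]]

def split_score_alt (str : String) : List String := pvGoB str.toList

-- ===== PRECONDITION & SPEC =====
def Spec_split_score (str : String) (out : List String) : Prop := out = split_score_alt str
instance (str : String) (out : List String) : Decidable (Spec_split_score str out) := by unfold Spec_split_score; infer_instance

-- ===== CLAIM (what is proved, stated in full; the proofs are below) =====
def Claim_equal_split_score : Prop := ∀ (str : String), Dom_split_score str → Spec_split_score str (split_score str)

-- ===== LEMMAS AND PROOFS =====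

-- flush of A's final state
def pvFlush (st : List String × String) : List String :=
  if st.2 ≠ "" then st.1 ++ [st.2] else st.1

theorem pvMkNeEmpty (c : Char) : String.ofList [c] ≠ "" := by
  intro h; simpa using congrArg String.toList h

theorem pvPush0 (c : Char) : String.push "" c = String.ofList [c] :=
  String.toList_inj.mp (by simp)

theorem pvPush1 (c d : Char) : String.push (String.ofList [c]) d = String.ofList [c, d] :=
  String.toList_inj.mp (by simp)

-- the key invariant: A's fold from an empty buffer yields B's token stream;
-- from a one-char non-sign buffer ⟨[c]⟩ it yields B's stream for c prepended to the rest.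
theorem pvInv (l : List Char) :
    (∀ arr, pvFlush (l.foldl pvStepA (arr, "")) = arr ++ pvGoB l) ∧
    (∀ arr c, pvSignA c = false →
      pvFlush (l.foldl pvStepA (arr, String.ofList [c])) = arr ++ pvGoB (c :: l)) := by
  induction l with
  | nil =>
    constructor
    · intro arr; simp [pvFlush, pvGoB]
    · intro arr c hc
      simp [pvFlush, pvMkNeEmpty c, pvGoB, show pvSignB c = false from hc]
  | cons d rest ih =>
    constructor
    · intro arr
      by_cases hd : pvSignA d = true
      · have hstep : pvStepA (arr, "") d = (arr ++ [String.ofList [d]], "") := by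
          simp [pvStepA, hd, pvPush0]
        rw [List.foldl_cons, hstep, ih.1]
        cases rest <;> simp [pvGoB, show pvSignB d = true from hd]
      · have hd' : pvSignA d = false := by simpa using hd
        have hstep : pvStepA (arr, "") d = (arr, String.ofList [d]) := by
          simp [pvStepA, hd']
        rw [List.foldl_cons, hstep, ih.2 arr d hd']
    · intro arr c hc
      by_cases hd : pvSignA d = true
      · have hstep : pvStepA (arr, String.ofList [c]) d = (arr ++ [String.ofList [c, d]], "") := by
          simp [pvStepA, hd, pvPush1]
        rw [List.foldl_cons, hstep, ih.1]
        simp [pvGoB, show pvSignB c = false from hc, show pvSignB d = true from hd]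

      · have hd' : pvSignA d = false := by simpa using hd
        have hstep : pvStepA (arr, String.ofList [c]) d
            = (arr ++ [String.ofList [c]], String.ofList [d]) := by
          simp [pvStepA, hd', pvMkNeEmpty c]
        rw [List.foldl_cons, hstep, ih.2 _ d hd']
        simp [pvGoB, show pvSignB c = false from hc, show pvSignB d = false from hd']

-- ===== VERDICT (by name: the statement is the Claim_ definition above) =====
theorem split_score_spec : Claim_equal_split_score := by
  intro str _
  unfold Spec_split_score split_score split_score_alt
  simpa [pvFlush] using (pvInv str.toList).1 []
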